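-- pv_equiv track=rewrite | github.com/portholl/ML_3_course | [Research][1] Numpy-pandas-matplotlib/research_functions.py | are_multisets_equal
-- ===== SOURCE A (Python) =====
-- from typing import List
--
-- def are_multisets_equal(x: List[int], y: List[int]) -> bool:
--     def count_elements(vector):
--         element_counts = {}
--         for element in vector:
--             if element in element_counts:
--                 element_counts[element] += 1
--             else:
--                 element_counts[element] = 1
--         return element_counts
--
--     x_counts = count_elements(x)
--     y_counts = count_elements(y)
--     if x_counts == y_counts:
--         return True
--     else:
--         return False
--     """
--     Проверить, задают ли два вектора одно и то же мультимножество.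
--     """
--     pass
-- ===== SOURCE B (Python) =====
-- def are_multisets_equal(x, y):
--     return sorted(x) == sorted(y)
-- ===== Notes on version B (the rewrite author's own statement) =====
-- stated objective: simpler
-- what changed: Replaces the frequency-dictionary construction and order-insensitive dict comparison with a one-line sort-and-compare: sorted(x) == sorted(y).
import Mathlib
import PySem

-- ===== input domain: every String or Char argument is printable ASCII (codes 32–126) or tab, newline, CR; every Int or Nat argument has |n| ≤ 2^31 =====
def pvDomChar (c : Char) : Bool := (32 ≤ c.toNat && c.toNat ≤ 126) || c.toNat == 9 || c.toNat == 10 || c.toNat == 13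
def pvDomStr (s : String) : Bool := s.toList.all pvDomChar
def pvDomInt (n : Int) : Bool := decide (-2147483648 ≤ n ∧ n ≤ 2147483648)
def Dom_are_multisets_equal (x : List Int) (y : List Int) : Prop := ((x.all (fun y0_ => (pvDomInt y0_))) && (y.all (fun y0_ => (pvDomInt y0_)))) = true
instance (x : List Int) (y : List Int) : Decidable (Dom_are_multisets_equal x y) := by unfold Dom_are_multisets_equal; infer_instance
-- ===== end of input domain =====

-- B replaces A's frequency-dictionary build-and-compare with a one-line sort-and-compare (objective: simpler).

-- ===== PORT A =====
-- inner helper count_elements: the if/else counting loop over the vector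
def pvCountElements (vector : List Int) : PySem.Dict Int Int :=
  vector.foldl
    (fun element_counts element =>
      if element_counts.contains element then
        element_counts.insert element (element_counts.getD element 0 + 1)
      else
        element_counts.insert element 1)
    PySem.Dict.empty

-- Python's 'dict1 == dict2' ignores insertion order: same keys and same value at each key
def pvDictEq (d1 d2 : PySem.Dict Int Int) : Bool :=
  d1.keys.all (fun k => d1.get? k == d2.get? k) && d2.keys.all (fun k => d2.get? k == d1.get? k)

def are_multisets_equal (x : List Int) (y : List Int) : Bool :=
  if pvDictEq (pvCountElements x) (pvCountElements y) then true else false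

-- ===== PORT B =====
def are_multisets_equal_alt (x : List Int) (y : List Int) : Bool :=
  PySem.List.sorted x (fun v => v) false == PySem.List.sorted y (fun v => v) false

-- ===== PRECONDITION & SPEC =====
def Spec_are_multisets_equal (x : List Int) (y : List Int) (out : Bool) : Prop := out = are_multisets_equal_alt x y
instance (x : List Int) (y : List Int) (out : Bool) : Decidable (Spec_are_multisets_equal x y out) := by unfold Spec_are_multisets_equal; infer_instance

-- ===== CLAIM (what is proved, stated in full; the proofs are below) =====
def Claim_equal_are_multisets_equal : Prop := ∀ (x : List Int) (y : List Int), Dom_are_multisets_equal x y → Spec_are_multisets_equal x y (are_multisets_equal x y)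

-- ===== LEMMAS AND PROOFS =====

-- A's counting loop (both branches are an insert of getD+1, since getD is 0 on an absent key)
theorem pvCountElements_eq_counter (l : List Int) : pvCountElements l = PySem.Dict.counter l := by
  rw [← PySem.Dict.foldl_insert_getD_add_one_eq_counter]
  unfold pvCountElements
  congr 1
  funext d e
  by_cases h : d.contains e = true
  · simp [h]
  · simp only [Bool.not_eq_true] at h
    rw [PySem.Dict.getD_of_not_contains _ _ h]
    simp [h]

theorem pvCounts_getD (l : List Int) (v : Int) :
    (pvCountElements l).getD v 0 = (l.count v : Int) := by
  rw [pvCountElements_eq_counter]; exact PySem.Dict.getD_counter l v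

theorem pvCounts_contains (l : List Int) (v : Int) :
    (pvCountElements l).contains v = decide (v ∈ l) := by
  rw [pvCountElements_eq_counter, PySem.Dict.contains_counter]
  simp

theorem pvCounts_get?_of_mem (l : List Int) (v : Int) (h : v ∈ l) :
    (pvCountElements l).get? v = some (l.count v : Int) := by
  have hc : (pvCountElements l).contains v = true := by
    rw [pvCounts_contains]; exact decide_eq_true h
  rw [PySem.Dict.contains_eq_isSome_get?] at hc
  obtain ⟨c, hcv⟩ := Option.isSome_iff_exists.mp hc
  have := pvCounts_getD l v
  rw [PySem.Dict.getD_eq_get?_getD, hcv] at this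
  simpa [hcv] using this

theorem pvCounts_get?_of_not_mem (l : List Int) (v : Int) (h : v ∉ l) :
    (pvCountElements l).get? v = none := by
  have hc : (pvCountElements l).contains v = false := by
    rw [pvCounts_contains]; exact decide_eq_false h
  rw [PySem.Dict.contains_eq_isSome_get?] at hc
  exact Option.not_isSome_iff_eq_none.mp (by simp [hc])

theorem pvCounts_mem_keys (l : List Int) (v : Int) :
    v ∈ (pvCountElements l).keys ↔ v ∈ l := by
  rw [← PySem.Dict.contains_iff_mem_keys, pvCounts_contains]
  simp

theorem pvDictEq_iff_perm (x y : List Int) :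
    pvDictEq (pvCountElements x) (pvCountElements y) = true ↔ x.Perm y := by
  rw [List.perm_iff_count]
  unfold pvDictEq
  simp only [Bool.and_eq_true, List.all_eq_true, beq_iff_eq]
  constructor
  · rintro ⟨h1, h2⟩ v
    by_cases hx : v ∈ x
    · have := h1 v ((pvCounts_mem_keys x v).mpr hx)
      rw [pvCounts_get?_of_mem x v hx] at this
      by_cases hy : v ∈ y
      · rw [pvCounts_get?_of_mem y v hy] at this
        have : (x.count v : Int) = (y.count v : Int) := by
          simpa using this
        exact_mod_cast this
      · rw [pvCounts_get?_of_not_mem y v hy] at this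
        simp at this
    · by_cases hy : v ∈ y
      · have := h2 v ((pvCounts_mem_keys y v).mpr hy)
        rw [pvCounts_get?_of_mem y v hy, pvCounts_get?_of_not_mem x v hx] at this
        simp at this
      · rw [List.count_eq_zero_of_not_mem hx, List.count_eq_zero_of_not_mem hy]
  · intro h
    have key : ∀ v : Int, (pvCountElements x).get? v = (pvCountElements y).get? v := by
      intro v
      by_cases hx : v ∈ x
      · have hy : v ∈ y := by
          have := h v
          have : 0 < y.count v := by
            rw [← this]; exact List.count_pos_iff.mpr hx
          exact List.count_pos_iff.mp this
        rw [pvCounts_get?_of_mem x v hx, pvCounts_get?_of_mem y v hy, h v]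
      · have hy : v ∉ y := by
          intro hy
          have := h v
          have h0 : 0 < y.count v := List.count_pos_iff.mpr hy
          rw [← this] at h0
          exact hx (List.count_pos_iff.mp h0)
        rw [pvCounts_get?_of_not_mem x v hx, pvCounts_get?_of_not_mem y v hy]
    exact ⟨fun k _ => key k, fun k _ => (key k).symm⟩

-- ===== VERDICT (by name: the statement is the Claim_ definition above) =====
theorem are_multisets_equal_spec : Claim_equal_are_multisets_equal := by
  intro x y _
  unfold Spec_are_multisets_equal are_multisets_equal are_multisets_equal_alt
  by_cases h : x.Perm y
  · rw [if_pos ((pvDictEq_iff_perm x y).mpr h)]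
    exact (beq_iff_eq.mpr ((PySem.List.sorted_id_eq_sorted_id_iff_perm x y).mpr h)).symm
  · rw [if_neg (fun hc => h ((pvDictEq_iff_perm x y).mp hc))]
    have : ¬ PySem.List.sorted x (fun v => v) false = PySem.List.sorted y (fun v => v) false :=
      fun hc => h ((PySem.List.sorted_id_eq_sorted_id_iff_perm x y).mp hc)
    simp [this]
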